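-- pv_equiv track=rewrite | github.com/QitaoXu/Lintcode | interviews/IXL/holesInNum.py | getHoleInNum
-- ===== SOURCE A (Python) =====
-- ZERO = set([1, 3, 5, 7])
--
-- ONE = set([0, 2, 4, 6])
--
-- def getHoleInNum(num):
--
--     if num == 0:
--         return 1
--
--     holes = 0
--
--     while num > 0:
--
--         digit = num % 10
--
--         if digit in ZERO:
--             hole = 0
--
--         elif digit in ONE:
--             hole = 1
--
--         else:
--             hole = 2
--
--         holes += hole
--         num = num // 10
--
--     return holes
-- ===== SOURCE B (Python) =====
-- HOLES = {'0': 1, '1': 0, '2': 1, '3': 0, '4': 1,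
--          '5': 0, '6': 1, '7': 0, '8': 2, '9': 2}
--
--
-- def getHoleInNum(num):
--     if num < 0:
--         return 0
--     return sum(HOLES[c] for c in str(num))
-- ===== Notes on version B (the rewrite author's own statement) =====
-- stated objective: idiomatic
-- what changed: B sums a per-character hole-count table over the decimal string of the number instead of extracting digits by repeated modulus and floor division in a while loop (and needs no special zero branch).
import Mathlib
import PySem

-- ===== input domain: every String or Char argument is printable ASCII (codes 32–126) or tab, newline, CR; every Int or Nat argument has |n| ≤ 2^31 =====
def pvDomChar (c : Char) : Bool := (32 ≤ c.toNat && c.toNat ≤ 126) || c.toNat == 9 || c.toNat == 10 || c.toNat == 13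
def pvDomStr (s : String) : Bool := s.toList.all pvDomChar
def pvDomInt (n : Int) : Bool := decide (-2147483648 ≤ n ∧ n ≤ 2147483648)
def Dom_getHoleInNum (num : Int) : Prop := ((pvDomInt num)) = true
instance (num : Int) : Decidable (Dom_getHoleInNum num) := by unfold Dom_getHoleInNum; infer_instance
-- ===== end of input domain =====

-- B replaces A's digit-extraction while loop by summing a per-character
-- hole-count table over str(num) (idiomatic; no special num==0 branch needed).


-- ===== PORT A =====
def pvZERO : PySem.Set Int := PySem.Set.ofList [1, 3, 5, 7]

def pvONE : PySem.Set Int := PySem.Set.ofList [0, 2, 4, 6]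

-- the while-loop of A, as structural recursion on the same state (num, holes)
def pvALoop (num holes : Int) : Int :=
  if _h : num > 0 then
    let digit := PySem.Int.mod num 10
    let hole : Int := if digit ∈ pvZERO then 0 else if digit ∈ pvONE then 1 else 2
    pvALoop (PySem.Int.floordiv num 10) (holes + hole)
  else holes
termination_by num.toNat
decreasing_by
  have h10 : (0:Int) < 10 := by omega
  rw [PySem.Int.floordiv_eq_ediv_of_pos h10]
  omega

def getHoleInNum (num : Int) : Int :=
  if num = 0 then 1
  else pvALoop num 0

-- ===== PORT B =====
def pvHOLES : PySem.Dict Char Int :=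
  PySem.Dict.ofList [('0', 1), ('1', 0), ('2', 1), ('3', 0), ('4', 1),
                     ('5', 0), ('6', 1), ('7', 0), ('8', 2), ('9', 2)]

-- HOLES[c]; the `.getD 0` covers KeyError, unreachable for the digits of a nonnegative num
def pvLookup (c : Char) : Int := (PySem.Dict.get? pvHOLES c).getD 0

def getHoleInNum_alt (num : Int) : Int :=
  if num < 0 then 0
  else ((PySem.Int.toChars num).map pvLookup).sum

-- ===== PRECONDITION & SPEC =====
def Spec_getHoleInNum (num : Int) (out : Int) : Prop := out = getHoleInNum_alt num
instance (num : Int) (out : Int) : Decidable (Spec_getHoleInNum num out) := by unfold Spec_getHoleInNum; infer_instance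

-- ===== CLAIM (what is proved, stated in full; the proofs are below) =====
def Claim_equal_getHoleInNum : Prop := ∀ (num : Int), Dom_getHoleInNum num → Spec_getHoleInNum num (getHoleInNum num)

-- ===== LEMMAS AND PROOFS =====

-- sum of hole counts of the decimal digits of a Nat, mirroring toDigitsCore's recursion
def pvHsum (n : Nat) : Int :=
  pvLookup (Nat.digitChar (n % 10)) + (if h : n / 10 = 0 then 0 else pvHsum (n / 10))
decreasing_by exact Nat.div_lt_self (by omega) (by omega)

lemma pvCoreSum (f : Nat) : ∀ (n : Nat) (ds : List Char), n < f →
    ((Nat.toDigitsCore 10 f n ds).map pvLookup).sum = pvHsum n + (ds.map pvLookup).sum := by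
  induction f with
  | zero => intro n ds h; omega
  | succ f ih =>
    intro n ds h
    rw [Nat.toDigitsCore, pvHsum]
    by_cases h0 : n / 10 = 0
    · simp [h0]
    · have hn : 10 ≤ n := by
        by_contra hc; exact h0 (Nat.div_eq_of_lt (by omega))
      have hlt : n / 10 < f := by
        have := Nat.div_lt_self (show 0 < n by omega) (show (1:Nat) < 10 by omega)
        omega
      rw [if_neg h0, dif_neg h0]
      rw [ih (n / 10) _ hlt]
      simp only [List.map_cons, List.sum_cons]
      ring

lemma pvHoleDigit (m : Nat) :
    (if ((m % 10 : Nat) : Int) ∈ pvZERO then (0:Int)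
     else if ((m % 10 : Nat) : Int) ∈ pvONE then 1 else 2) = pvLookup (Nat.digitChar (m % 10)) := by
  have h : m % 10 < 10 := Nat.mod_lt _ (by omega)
  interval_cases h' : m % 10 <;> decide

lemma pvALoop_eq (m : Nat) : ∀ holes : Int, 0 < m → pvALoop (m : Int) holes = holes + pvHsum m := by
  induction m using Nat.strong_induction_on with
  | _ m ih =>
    intro holes hm
    rw [pvALoop, pvHsum]
    have h10 : (0:Int) < 10 := by omega
    have hpos : ((m : Int) > 0) := by exact_mod_cast hm
    rw [dif_pos hpos]
    have hmod : PySem.Int.mod (m : Int) 10 = ((m % 10 : Nat) : Int) := by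
      rw [PySem.Int.mod_eq_emod_of_pos h10]; omega
    have hdiv : PySem.Int.floordiv (m : Int) 10 = ((m / 10 : Nat) : Int) := by
      rw [PySem.Int.floordiv_eq_ediv_of_pos h10]; omega
    simp only [hmod, hdiv]
    rw [pvHoleDigit]
    by_cases h0 : m / 10 = 0
    · rw [dif_pos h0, h0]
      simp [pvALoop]
    · rw [dif_neg h0]
      rw [ih (m / 10) (Nat.div_lt_self (by omega) (by omega)) _ (by omega)]
      ring

-- ===== VERDICT (by name: the statement is the Claim_ definition above) =====
theorem getHoleInNum_spec : Claim_equal_getHoleInNum := by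
  intro num _
  unfold Spec_getHoleInNum getHoleInNum getHoleInNum_alt
  rcases lt_trichotomy num 0 with hneg | hz | hpos
  · rw [if_neg (by omega), if_pos hneg, pvALoop, dif_neg (by omega)]
  · subst hz; decide
  · rw [if_neg (by omega), if_neg (by omega)]
    obtain ⟨m, rfl⟩ : ∃ m : Nat, num = (m : Int) := ⟨num.toNat, (Int.toNat_of_nonneg (by omega)).symm⟩
    have hm : 0 < m := by exact_mod_cast hpos
    rw [pvALoop_eq m 0 hm]
    have : PySem.Int.toChars (m : Int) = Nat.toDigits 10 m := by
      unfold PySem.Int.toChars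
      rw [if_neg (by omega)]
      simp
    rw [this, Nat.toDigits, pvCoreSum (m + 1) m [] (by omega)]
    simp
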